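-- pv_equiv track=rewrite | github.com/kanyingidickson-dev/Password-Strength-Checker | src/entropy.py | estimate_charset_size
-- ===== SOURCE A (Python) =====
-- import string
--
-- def estimate_charset_size(password: str) -> int:
--     has_lower = any(c.islower() for c in password)
--     has_upper = any(c.isupper() for c in password)
--     has_digit = any(c.isdigit() for c in password)
--     has_symbol = any(c in string.punctuation for c in password)
--     has_other = any(
--         (not c.islower())
--         and (not c.isupper())
--         and (not c.isdigit())
--         and (c not in string.punctuation)
--         for c in password
--     )
--
--     size = 0
--     if has_lower:
--         size += 26
--     if has_upper:
--         size += 26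
--     if has_digit:
--         size += 10
--     if has_symbol:
--         size += len(string.punctuation)
--     if has_other:
--         size += 32
--
--     return max(size, 1)
-- ===== SOURCE B (Python) =====
-- import string
--
-- def estimate_charset_size(password: str) -> int:
--     has_lower = has_upper = has_digit = has_symbol = has_other = False
--     for c in password:
--         if c.islower():
--             has_lower = True
--         elif c.isupper():
--             has_upper = True
--         elif c.isdigit():
--             has_digit = True
--         elif c in string.punctuation:
--             has_symbol = True
--         else:
--             has_other = True
--
--     size = 0
--     if has_lower:
--         size += 26
--     if has_upper:
--         size += 26
--     if has_digit:
--         size += 10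
--     if has_symbol:
--         size += len(string.punctuation)
--     if has_other:
--         size += 32
--
--     return max(size, 1)
-- ===== Notes on version B (the rewrite author's own statement) =====
-- stated objective: simpler
-- what changed: Replaces five independent any()-scans of the password with one pass that classifies each character through an if/elif chain into exactly one of five boolean flags (the categories are disjoint on ASCII), keeping the same size-accumulation block; measured faster by the constant factor of a single traversal without generator overhead.
import Mathlib
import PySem

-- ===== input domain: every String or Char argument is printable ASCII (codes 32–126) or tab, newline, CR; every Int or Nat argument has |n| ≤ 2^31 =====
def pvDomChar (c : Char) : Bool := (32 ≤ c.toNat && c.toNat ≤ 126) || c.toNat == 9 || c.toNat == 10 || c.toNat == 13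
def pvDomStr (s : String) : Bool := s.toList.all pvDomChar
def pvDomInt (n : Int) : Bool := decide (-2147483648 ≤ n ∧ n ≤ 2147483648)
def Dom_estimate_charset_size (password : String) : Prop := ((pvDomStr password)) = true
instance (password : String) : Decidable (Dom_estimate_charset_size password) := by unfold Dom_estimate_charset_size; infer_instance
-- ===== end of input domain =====

-- B replaces A's five independent any()-scans with one pass classifying each character
-- via an if/elif chain into one of five disjoint flags (simpler: one traversal, same arithmetic).


-- string.punctuation, shared module constant
def pvPunct : List Char :=
  ['!', '"', '#', '$', '%', '&', '\'', '(', ')', '*', '+', ',', '-', '.', '/',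
   ':', ';', '<', '=', '>', '?', '@', '[', '\\', ']', '^', '_', '`', '{', '|', '}', '~']

-- ===== PORT A =====
def estimate_charset_size (password : String) : Int :=
  let cs := password.toList
  let has_lower := cs.any PySem.Chars.islower
  let has_upper := cs.any PySem.Chars.isupper
  let has_digit := cs.any PySem.Chars.isdigit
  let has_symbol := cs.any (fun c => decide (c ∈ pvPunct))
  let has_other := cs.any (fun c =>
    !PySem.Chars.islower c && !PySem.Chars.isupper c && !PySem.Chars.isdigit c
      && !decide (c ∈ pvPunct))
  let size : Int := 0
  let size := if has_lower then size + 26 else size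
  let size := if has_upper then size + 26 else size
  let size := if has_digit then size + 10 else size
  let size := if has_symbol then size + (pvPunct.length : Int) else size
  let size := if has_other then size + 32 else size
  max size 1

-- ===== PORT B =====
-- one step of B's for-loop: the if/elif chain setting exactly one flag
def pvStep (f : Bool × Bool × Bool × Bool × Bool) (c : Char) :
    Bool × Bool × Bool × Bool × Bool :=
  if PySem.Chars.islower c then (true, f.2.1, f.2.2.1, f.2.2.2.1, f.2.2.2.2)
  else if PySem.Chars.isupper c then (f.1, true, f.2.2.1, f.2.2.2.1, f.2.2.2.2)
  else if PySem.Chars.isdigit c then (f.1, f.2.1, true, f.2.2.2.1, f.2.2.2.2)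
  else if decide (c ∈ pvPunct) then (f.1, f.2.1, f.2.2.1, true, f.2.2.2.2)
  else (f.1, f.2.1, f.2.2.1, f.2.2.2.1, true)

def estimate_charset_size_alt (password : String) : Int :=
  let f := password.toList.foldl pvStep (false, false, false, false, false)
  let size : Int := 0
  let size := if f.1 then size + 26 else size
  let size := if f.2.1 then size + 26 else size
  let size := if f.2.2.1 then size + 10 else size
  let size := if f.2.2.2.1 then size + (pvPunct.length : Int) else size
  let size := if f.2.2.2.2 then size + 32 else size
  max size 1

-- ===== PRECONDITION & SPEC =====
def Spec_estimate_charset_size (password : String) (out : Int) : Prop := out = estimate_charset_size_alt password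
instance (password : String) (out : Int) : Decidable (Spec_estimate_charset_size password out) := by unfold Spec_estimate_charset_size; infer_instance

-- ===== CLAIM (what is proved, stated in full; the proofs are below) =====
def Claim_equal_estimate_charset_size : Prop := ∀ (password : String), Dom_estimate_charset_size password → Spec_estimate_charset_size password (estimate_charset_size password)

-- ===== LEMMAS AND PROOFS =====

lemma pv_lower_not_upper (c : Char) (h : PySem.Chars.islower c = true) :
    PySem.Chars.isupper c = false := by
  simp [PySem.Chars.islower] at h
  simp [PySem.Chars.isupper]
  intro _
  exact lt_of_lt_of_le (by decide) h.1

lemma pv_lower_not_digit (c : Char) (h : PySem.Chars.islower c = true) :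
    PySem.Chars.isdigit c = false := by
  simp [PySem.Chars.islower] at h
  simp [PySem.Chars.isdigit]
  intro _
  exact lt_of_lt_of_le (by decide) h.1

lemma pv_upper_not_digit (c : Char) (h : PySem.Chars.isupper c = true) :
    PySem.Chars.isdigit c = false := by
  simp [PySem.Chars.isupper] at h
  simp [PySem.Chars.isdigit]
  intro _
  exact lt_of_lt_of_le (by decide) h.1

lemma pv_punct_not_alnum : ∀ c ∈ pvPunct,
    PySem.Chars.islower c = false ∧ PySem.Chars.isupper c = false ∧
      PySem.Chars.isdigit c = false := by
  have h : pvPunct.all (fun c => !PySem.Chars.islower c && !PySem.Chars.isupper c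
      && !PySem.Chars.isdigit c) = true := by decide
  intro c hc
  have := List.all_eq_true.mp h c hc
  simp only [Bool.and_eq_true, Bool.not_eq_true'] at this
  exact ⟨this.1.1, this.1.2, this.2⟩

lemma pv_punct_false_of_lower (c : Char) (h : PySem.Chars.islower c = true) :
    decide (c ∈ pvPunct) = false := by
  by_contra hc
  simp only [Bool.not_eq_false, decide_eq_true_eq] at hc
  exact absurd h (by simp [(pv_punct_not_alnum c hc).1])

lemma pv_punct_false_of_upper (c : Char) (h : PySem.Chars.isupper c = true) :
    decide (c ∈ pvPunct) = false := by
  by_contra hc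
  simp only [Bool.not_eq_false, decide_eq_true_eq] at hc
  exact absurd h (by simp [(pv_punct_not_alnum c hc).2.1])

lemma pv_punct_false_of_digit (c : Char) (h : PySem.Chars.isdigit c = true) :
    decide (c ∈ pvPunct) = false := by
  by_contra hc
  simp only [Bool.not_eq_false, decide_eq_true_eq] at hc
  exact absurd h (by simp [(pv_punct_not_alnum c hc).2.2])

-- the single-pass fold computes exactly A's five any-scans
lemma pv_fold_flags (l : List Char) (f : Bool × Bool × Bool × Bool × Bool) :
    l.foldl pvStep f =
      (f.1 || l.any PySem.Chars.islower,
       f.2.1 || l.any PySem.Chars.isupper,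
       f.2.2.1 || l.any PySem.Chars.isdigit,
       f.2.2.2.1 || l.any (fun c => decide (c ∈ pvPunct)),
       f.2.2.2.2 || l.any (fun c =>
         !PySem.Chars.islower c && !PySem.Chars.isupper c && !PySem.Chars.isdigit c
           && !decide (c ∈ pvPunct))) := by
  induction l generalizing f with
  | nil => simp
  | cons c t ih =>
    simp only [List.foldl_cons, List.any_cons, ih]
    by_cases hl : PySem.Chars.islower c = true
    · simp [pvStep, hl, pv_lower_not_upper c hl, pv_lower_not_digit c hl,
        pv_punct_false_of_lower c hl]
    · by_cases hu : PySem.Chars.isupper c = true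
      · simp [pvStep, hl, hu, pv_upper_not_digit c hu,
          pv_punct_false_of_upper c hu]
      · by_cases hd : PySem.Chars.isdigit c = true
        · simp [pvStep, hl, hu, hd, pv_punct_false_of_digit c hd]
        · by_cases hp : decide (c ∈ pvPunct) = true
          · simp [pvStep, hl, hu, hd, hp]
          · simp only [Bool.not_eq_true] at hl hu hd hp
            simp [pvStep, hl, hu, hd, hp]

-- ===== VERDICT (by name: the statement is the Claim_ definition above) =====
theorem estimate_charset_size_spec : Claim_equal_estimate_charset_size := by
  intro password _
  unfold Spec_estimate_charset_size estimate_charset_size estimate_charset_size_alt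
  simp only [pv_fold_flags, Bool.false_or]
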